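-- pv_equiv track=rewrite | github.com/Antonescu-Denis/Algorithm-Visualiser | Algorithm_Visualiser.py | GetColourArrayM
-- ===== SOURCE A (Python) =====
-- def GetColourArrayM(length, left, middle, right, idx):
--     coloured = []
--     for x in range(length):
--         if x == idx:
--             coloured.append('red')
--         elif x in range(left, right+1):
--             if x > idx:
--                 if x <= middle:
--                     coloured.append('#bfff80')
--                 else:
--                     coloured.append('#8097ff')
--             else:
--                 coloured.append('white')
--         else:
--             coloured.append('gray')
--     return coloured
-- ===== SOURCE B (Python) =====
-- def GetColourArrayM(length, left, middle, right, idx):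
--     n = max(length, 0)
--     coloured = ['gray'] * n
--     lo = max(left, 0)
--     hi = min(right + 1, n)
--     for x in range(lo, hi):
--         if x > idx:
--             coloured[x] = '#bfff80' if x <= middle else '#8097ff'
--         else:
--             coloured[x] = 'white'
--     if 0 <= idx < n:
--         coloured[idx] = 'red'
--     return coloured
-- ===== Notes on version B (the rewrite author's own statement) =====
-- stated objective: faster
-- what changed: B pre-fills the whole array with 'gray', assigns region colours only over the clamped intersection of [left, right] with [0, length), and writes 'red' at idx last, instead of A's per-index branch chain with an O(right-left) 'x in range(...)' membership scan inside the loop.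
import Mathlib
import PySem

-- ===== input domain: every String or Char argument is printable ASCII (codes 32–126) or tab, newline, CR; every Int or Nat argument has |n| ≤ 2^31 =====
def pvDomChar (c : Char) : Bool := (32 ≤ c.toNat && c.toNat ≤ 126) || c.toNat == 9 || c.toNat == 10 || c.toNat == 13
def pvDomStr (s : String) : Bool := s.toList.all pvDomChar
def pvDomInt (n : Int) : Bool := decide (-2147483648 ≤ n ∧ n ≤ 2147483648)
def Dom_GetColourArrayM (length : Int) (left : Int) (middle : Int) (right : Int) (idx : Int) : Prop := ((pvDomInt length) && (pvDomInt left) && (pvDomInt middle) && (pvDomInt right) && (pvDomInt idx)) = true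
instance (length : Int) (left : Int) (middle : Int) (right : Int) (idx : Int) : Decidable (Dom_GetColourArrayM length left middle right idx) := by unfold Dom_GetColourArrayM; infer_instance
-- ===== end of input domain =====

-- B pre-fills 'gray', colours only the clamped region [max left 0, min (right+1) length) in place,
-- then writes 'red' at idx last — instead of A's per-index branch chain with a range-membership test.

-- ===== PORT A =====
-- 'x in range(left, right+1)' is exactly left ≤ x ∧ x ≤ right (step-1 range membership).
def GetColourArrayM (length : Int) (left : Int) (middle : Int) (right : Int) (idx : Int) : List String :=
  (PySem.List.pyRange 0 length 1).foldl
    (fun coloured x =>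
      if x = idx then coloured ++ ["red"]
      else if left ≤ x ∧ x ≤ right then
        (if x > idx then
          (if x ≤ middle then coloured ++ ["#bfff80"] else coloured ++ ["#8097ff"])
        else coloured ++ ["white"])
      else coloured ++ ["gray"]) []

-- ===== PORT B =====
def GetColourArrayM_alt (length : Int) (left : Int) (middle : Int) (right : Int) (idx : Int) : List String :=
  let n : Int := max length 0
  let coloured := List.replicate n.toNat "gray"
  let coloured := (PySem.List.pyRange (max left 0) (min (right + 1) n) 1).foldl
    (fun acc x =>
      acc.set x.toNat (if x > idx then (if x ≤ middle then "#bfff80" else "#8097ff") else "white"))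
    coloured
  if 0 ≤ idx ∧ idx < n then coloured.set idx.toNat "red" else coloured

-- ===== PRECONDITION & SPEC =====
def Spec_GetColourArrayM (length : Int) (left : Int) (middle : Int) (right : Int) (idx : Int) (out : List String) : Prop := out = GetColourArrayM_alt length left middle right idx
instance (length : Int) (left : Int) (middle : Int) (right : Int) (idx : Int) (out : List String) : Decidable (Spec_GetColourArrayM length left middle right idx out) := by unfold Spec_GetColourArrayM; infer_instance

-- ===== CLAIM (what is proved, stated in full; the proofs are below) =====
def Claim_equal_GetColourArrayM : Prop := ∀ (length : Int) (left : Int) (middle : Int) (right : Int) (idx : Int), Dom_GetColourArrayM length left middle right idx → Spec_GetColourArrayM length left middle right idx (GetColourArrayM length left middle right idx)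

-- ===== LEMMAS AND PROOFS =====

-- Element view of B's region-assignment loop.
theorem set_fold_getElem? (lo hi : Int) (f : Int → String) (L : List String)
    (hlo : 0 ≤ lo) (hhi : hi ≤ (L.length : Int)) (i : Nat) :
    ((PySem.List.pyRange lo hi 1).foldl (fun acc x => acc.set x.toNat (f x)) L)[i]? =
      if lo ≤ (i : Int) ∧ (i : Int) < hi then some (f (i : Int)) else L[i]? := by
  by_cases h : lo < hi
  · rw [PySem.List.pyRange_one_cons h, List.foldl_cons]
    have hlen : ((L.set lo.toNat (f lo)).length : Int) = (L.length : Int) := by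
      simp
    have ih := set_fold_getElem? (lo + 1) hi f (L.set lo.toNat (f lo))
      (by omega) (by omega) i
    rw [ih]
    by_cases hi2 : (i : Int) = lo
    · have hnat : lo.toNat = i := by omega
      have hlt : i < L.length := by omega
      simp [hnat, hi2, List.getElem?_set_self hlt]
      omega
    · rw [List.getElem?_set_ne (by omega)]
      split_ifs with h1 h2 h2 <;> first | rfl | omega
  · rw [PySem.List.pyRange_one_eq_nil (by omega)]
    simp only [List.foldl_nil]
    split_ifs with h1
    · omega
    · rfl
termination_by (hi - lo).toNat
decreasing_by omega

-- B's region loop preserves list length.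
theorem length_set_fold (l : List Int) (f : Int → String) (L : List String) :
    (l.foldl (fun acc x => acc.set x.toNat (f x)) L).length = L.length := by
  induction l generalizing L with
  | nil => rfl
  | cons y ys ih => rw [List.foldl_cons, ih]; simp

-- A as a map over the index range.
theorem portA_eq_map (length left middle right idx : Int) :
    GetColourArrayM length left middle right idx =
      (PySem.List.pyRange 0 length 1).map (fun x =>
        if x = idx then "red"
        else if left ≤ x ∧ x ≤ right then
          (if x > idx then (if x ≤ middle then "#bfff80" else "#8097ff") else "white")
        else "gray") := by
  unfold GetColourArrayM
  rw [show (fun (coloured : List String) (x : Int) =>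
      if x = idx then coloured ++ ["red"]
      else if left ≤ x ∧ x ≤ right then
        (if x > idx then
          (if x ≤ middle then coloured ++ ["#bfff80"] else coloured ++ ["#8097ff"])
        else coloured ++ ["white"])
      else coloured ++ ["gray"]) =
    (fun (coloured : List String) (x : Int) => coloured ++
      [if x = idx then "red"
       else if left ≤ x ∧ x ≤ right then
         (if x > idx then (if x ≤ middle then "#bfff80" else "#8097ff") else "white")
       else "gray"]) from by
      funext c x; split_ifs <;> rfl]
  rw [PySem.List.foldl_append_singleton_eq_map]
  simp

-- ===== VERDICT (by name: the statement is the Claim_ definition above) =====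
theorem GetColourArrayM_spec : Claim_equal_GetColourArrayM := by
  intro length left middle right idx _
  unfold Spec_GetColourArrayM GetColourArrayM_alt
  rw [portA_eq_map]
  apply List.ext_getElem?
  intro i
  have hA : ((PySem.List.pyRange 0 length 1).map (fun x =>
      if x = idx then "red"
      else if left ≤ x ∧ x ≤ right then
        (if x > idx then (if x ≤ middle then "#bfff80" else "#8097ff") else "white")
      else "gray"))[i]? =
      if h : i < length.toNat then
        some (if (i : Int) = idx then "red"
          else if left ≤ (i : Int) ∧ (i : Int) ≤ right then
            (if (i : Int) > idx then (if (i : Int) ≤ middle then "#bfff80" else "#8097ff") else "white")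
          else "gray")
      else none := by
    by_cases h : i < length.toNat
    · rw [dif_pos h, List.getElem?_map, PySem.List.getElem?_pyRange_one, if_pos (by omega)]
      simp
    · rw [dif_neg h, List.getElem?_eq_none]
      simp [PySem.List.length_pyRange_one]; omega
  rw [hA]
  have hfold := set_fold_getElem? (max left 0) (min (right + 1) (max length 0))
    (fun x => if x > idx then (if x ≤ middle then "#bfff80" else "#8097ff") else "white")
    (List.replicate (max length 0).toNat "gray") (by omega)
    (by simp; omega) i
  have hrep : (List.replicate (max length 0).toNat "gray")[i]? =
      if i < length.toNat then some "gray" else none := by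
    by_cases h : i < length.toNat
    · rw [if_pos h]; rw [List.getElem?_replicate_of_lt (by omega)]
    · rw [if_neg h, List.getElem?_eq_none]; simp; omega
  by_cases hred : 0 ≤ idx ∧ idx < max length 0
  · rw [if_pos hred]
    by_cases hi2 : idx.toNat = i
    · have hlen : i < ((PySem.List.pyRange (max left 0) (min (right + 1) (max length 0)) 1).foldl
          (fun acc x => acc.set x.toNat (if x > idx then (if x ≤ middle then "#bfff80" else "#8097ff") else "white"))
          (List.replicate (max length 0).toNat "gray")).length := by
        rw [length_set_fold]
        simp
        omega
      rw [hi2, List.getElem?_set_self hlen]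
      rw [dif_pos (by omega)]
      rw [if_pos (by omega)]
    · rw [List.getElem?_set_ne hi2, hfold, hrep]
      split_ifs <;> first | rfl | omega
  · rw [if_neg hred, hfold, hrep]
    split_ifs <;> first | rfl | omega
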